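-- pv_equiv track=rewrite | github.com/spyduck007/NetFlowAttackSequencer | chains/canonicalize.py | canonicalize_chains
-- ===== SOURCE A (Python) =====
-- from typing import List, Tuple
-- from collections import defaultdict
--
-- def canonicalize_chains(
--     chains: List[List[int]],
-- ) -> List[List[int]]:
--     groups = defaultdict(list)
--
--     for c in chains:
--         groups[(c[0], c[-1])].append(c)
--
--     canonical = []
--
--     for _, group in groups.items():
--         group.sort(key=lambda c: (-len(c), c))
--         canonical.append(group[0])
--
--     return canonical
-- ===== SOURCE B (Python) =====
-- def canonicalize_chains(chains):
--     # Single pass: keep, per (first, last) endpoint pair, the best chain seen so far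
--     # under the order (len descending, then lexicographically ascending).
--     best = {}
--     for c in chains:
--         k = (c[0], c[-1])
--         b = best.get(k)
--         if b is None or (-len(c), c) < (-len(b), b):
--             best[k] = c
--     return list(best.values())
-- ===== Notes on version B (the rewrite author's own statement) =====
-- stated objective: alternative
-- what changed: Instead of grouping chains into per-endpoint lists and sorting each group to take its head, B makes one online pass keeping a single best chain per (first,last) endpoint pair, replacing the incumbent only when the new chain wins on (length descending, then lexicographic); no group lists and no sort.
import Mathlib
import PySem

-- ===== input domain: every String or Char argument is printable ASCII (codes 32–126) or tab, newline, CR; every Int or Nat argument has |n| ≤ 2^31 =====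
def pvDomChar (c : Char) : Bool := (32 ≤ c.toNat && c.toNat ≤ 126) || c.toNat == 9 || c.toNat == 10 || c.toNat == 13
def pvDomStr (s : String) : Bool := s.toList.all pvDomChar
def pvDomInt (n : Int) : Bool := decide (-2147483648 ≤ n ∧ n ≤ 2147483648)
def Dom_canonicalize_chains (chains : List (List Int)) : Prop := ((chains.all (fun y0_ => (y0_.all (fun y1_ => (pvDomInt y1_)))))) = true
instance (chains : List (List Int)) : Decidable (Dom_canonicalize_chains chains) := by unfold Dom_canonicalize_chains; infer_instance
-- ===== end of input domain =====

-- B replaces group-then-sort with a single online pass keeping one best chain per endpoint pair (alternative decomposition; return value only).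

-- ===== PORT A =====
-- key (c[0], c[-1]); IndexError on an empty inner chain is excluded by Pre_ below
def pyKey (c : List Int) : Int × Int :=
  (PySem.List.pyGetD c 0 0, PySem.List.pyGetD c (-1) 0)

-- loop body of `for c in chains: groups[(c[0], c[-1])].append(c)` (defaultdict(list))
def groupStep (d : PySem.Dict (Int × Int) (List (List Int))) (c : List Int) :
    PySem.Dict (Int × Int) (List (List Int)) :=
  d.modify (pyKey c) [] (fun g => g ++ [c])

def canonicalize_chains (chains : List (List Int)) : List (List Int) :=
  let groups := chains.foldl groupStep PySem.Dict.empty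
  groups.items.foldl
    (fun canonical p =>
      canonical ++
        [PySem.List.pyGetD
          (PySem.List.sorted2 p.2 (fun c => -(c.length : Int)) (fun c => c)) 0 []])
    []

-- ===== PORT B =====
-- Python tuple comparison (-len(c), c) < (-len(b), b)
def tupLt (p q : Int × List Int) : Bool :=
  decide (p.1 < q.1) || (decide (p.1 = q.1) && decide (p.2 < q.2))

-- loop body of B: insert if the key is new, else replace only when strictly better
def bestStep (d : PySem.Dict (Int × Int) (List Int)) (c : List Int) :
    PySem.Dict (Int × Int) (List Int) :=
  match d.get? (pyKey c) with
  | none => d.insert (pyKey c) c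
  | some b =>
      if tupLt (-(c.length : Int), c) (-(b.length : Int), b) then d.insert (pyKey c) c else d

def canonicalize_chains_alt (chains : List (List Int)) : List (List Int) :=
  (chains.foldl bestStep PySem.Dict.empty).values

-- ===== PRECONDITION & SPEC =====
-- Pre_ excludes inputs containing an empty inner chain, on which Python A (c[0]) raises IndexError.
def Pre_canonicalize_chains (chains : List (List Int)) : Prop := ∀ c ∈ chains, c ≠ []
instance (chains : List (List Int)) : Decidable (Pre_canonicalize_chains chains) := by
  unfold Pre_canonicalize_chains; infer_instance

def pvWitness_canonicalize_chains : List (List Int) := [[1, 2, 3], [1, 3], [2], [1, 0, 3]]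

def Spec_canonicalize_chains (chains : List (List Int)) (out : List (List Int)) : Prop :=
  out = canonicalize_chains_alt chains
instance (chains : List (List Int)) (out : List (List Int)) :
    Decidable (Spec_canonicalize_chains chains out) := by
  unfold Spec_canonicalize_chains; infer_instance

-- ===== CLAIM (what is proved, stated in full; the proofs are below) =====
def Claim_equal_canonicalize_chains : Prop :=
  ∀ (chains : List (List Int)), Dom_canonicalize_chains chains →
    Pre_canonicalize_chains chains →
      Spec_canonicalize_chains chains (canonicalize_chains chains)

-- ===== LEMMAS AND PROOFS =====

-- the strict comparison sorted2 uses for key (-len c, c) (reverse = false)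
def sLt (c b : List Int) : Bool :=
  decide (-(c.length : Int) < -(b.length : Int)) ||
    (!decide (-(b.length : Int) < -(c.length : Int)) && decide (c < b))

-- the winner A's stable sort puts first: fold keeping the first strict minimum
def chooseBest : List (List Int) → List Int
  | [] => []
  | h :: t => t.foldl (fun b c => if sLt c b then c else b) h

theorem tupLt_eq_sLt (c b : List Int) :
    tupLt (-(c.length : Int), c) (-(b.length : Int), b) = sLt c b := by
  simp only [tupLt, sLt]
  rcases lt_trichotomy (-(c.length : Int)) (-(b.length : Int)) with h | h | h
  · simp [h, asymm h]
  · simp [h]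
  · simp [h, asymm h, ne_of_gt h]

theorem headI_foldl_insertBy {α : Type} (before : α → α → Bool) :
    ∀ (xs : List α) (b : α) (t : List α),
      ∃ t', xs.foldl (fun acc x => PySem.List.insertBy before x acc) (b :: t) =
        (xs.foldl (fun m x => if before x m then x else m) b) :: t' := by
  intro xs
  induction xs with
  | nil => intro b t; exact ⟨t, rfl⟩
  | cons x xs ih =>
    intro b t
    simp only [List.foldl_cons]
    by_cases hx : before x b = true
    · have hins : PySem.List.insertBy before x (b :: t) = x :: b :: t := by
        simp [PySem.List.insertBy, hx]
      rw [hins, if_pos hx]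
      exact ih x (b :: t)
    · have hx' : before x b = false := by simpa using hx
      have hins : PySem.List.insertBy before x (b :: t) = b :: PySem.List.insertBy before x t := by
        simp [PySem.List.insertBy, hx']
      rw [hins, if_neg hx]
      exact ih b _

theorem sorted2_head (h : List Int) (t : List (List Int)) :
    PySem.List.pyGetD
      (PySem.List.sorted2 (h :: t) (fun c => -(c.length : Int)) (fun c => c)) 0 []
      = chooseBest (h :: t) := by
  have hs : PySem.List.sorted2 (h :: t) (fun c => -(c.length : Int)) (fun c => c) =
      t.foldl (fun acc x => PySem.List.insertBy (fun a b => sLt a b) x acc) [h] := rfl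
  rw [hs]
  obtain ⟨t', ht⟩ := headI_foldl_insertBy (fun a b => sLt a b) t h []
  rw [ht]
  simp only [chooseBest]
  simp [PySem.List.pyGetD, PySem.List.pyGet?, PySem.List.pyIdx?]

theorem chooseBest_append (h c : List Int) (t : List (List Int)) :
    chooseBest (h :: (t ++ [c])) =
      if sLt c (chooseBest (h :: t)) then c else chooseBest (h :: t) := by
  simp [chooseBest, List.foldl_append]

-- chains filtered to one endpoint key
def filt (k : Int × Int) (chains : List (List Int)) : List (List Int) :=
  chains.filter (fun c => pyKey c == k)

theorem get?_foldB (chains : List (List Int)) (k : Int × Int) :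
    (chains.foldl bestStep PySem.Dict.empty).get? k =
      (match filt k chains with
       | [] => none
       | g => some (chooseBest g)) := by
  induction chains using List.reverseRecOn with
  | nil => simp [filt, PySem.Dict.get?_empty]
  | append_singleton l c ih =>
    rw [List.foldl_append]
    simp only [List.foldl_cons, List.foldl_nil]
    by_cases hk : pyKey c = k
    · subst hk
      have hfilt : filt (pyKey c) (l ++ [c]) = filt (pyKey c) l ++ [c] := by
        simp [filt, List.filter_append]
      rw [hfilt]
      cases hg : filt (pyKey c) l with
      | nil =>
        have h0 : (l.foldl bestStep PySem.Dict.empty).get? (pyKey c) = none := by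
          rw [ih, hg]
        simp [bestStep, h0, PySem.Dict.get?_insert_self, chooseBest]
      | cons g0 gt =>
        have h0 : (l.foldl bestStep PySem.Dict.empty).get? (pyKey c) =
            some (chooseBest (g0 :: gt)) := by rw [ih, hg]
        simp only [bestStep, h0]
        rw [tupLt_eq_sLt]
        by_cases hlt : sLt c (chooseBest (g0 :: gt)) = true
        · simp only [hlt, if_true, PySem.Dict.get?_insert_self]
          show some c = some (chooseBest (g0 :: (gt ++ [c])))
          rw [chooseBest_append, if_pos hlt]
        · have hlt' : sLt c (chooseBest (g0 :: gt)) = false := by simpa using hlt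
          simp only [hlt', Bool.false_eq_true, if_false, h0]
          show some (chooseBest (g0 :: gt)) = some (chooseBest (g0 :: (gt ++ [c])))
          rw [chooseBest_append, if_neg hlt]
    · have hfilt : filt k (l ++ [c]) = filt k l := by
        simp only [filt, List.filter_append, List.filter_cons, List.filter_nil]
        have : (pyKey c == k) = false := by simpa using hk
        simp [this]
      rw [hfilt, ← ih]
      have hne : k ≠ pyKey c := fun he => hk he.symm
      simp only [bestStep]
      cases (l.foldl bestStep PySem.Dict.empty).get? (pyKey c) with
      | none => exact PySem.Dict.get?_insert_of_ne _ _ hne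
      | some b =>
        by_cases hlt : tupLt (-(c.length : Int), c) (-(b.length : Int), b) = true
        · simp [hlt, PySem.Dict.get?_insert_of_ne _ _ hne]
        · simp [hlt]

theorem keys_foldB (chains : List (List Int)) :
    (chains.foldl bestStep PySem.Dict.empty).keys =
      PySem.Set.ofList (chains.map pyKey) := by
  induction chains using List.reverseRecOn with
  | nil => simp [PySem.Dict.keys_empty, PySem.Set.ofList_eq_foldl]
  | append_singleton l c ih =>
    rw [List.foldl_append]
    simp only [List.foldl_cons, List.foldl_nil, List.map_append, List.map_cons, List.map_nil]
    have hofl : PySem.Set.ofList (l.map pyKey ++ [pyKey c]) =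
        PySem.Set.add (PySem.Set.ofList (l.map pyKey)) (pyKey c) := by
      rw [PySem.Set.ofList_eq_foldl, PySem.Set.ofList_eq_foldl, List.foldl_append]
      rfl
    rw [hofl]
    simp only [bestStep]
    cases hg : (l.foldl bestStep PySem.Dict.empty).get? (pyKey c) with
    | none =>
      have hc : (l.foldl bestStep PySem.Dict.empty).contains (pyKey c) = false :=
        (PySem.Dict.get?_eq_none_iff_contains _ _).mp hg
      rw [PySem.Dict.keys_insert_of_not_contains _ _ hc, ih]
      have hmem : pyKey c ∉ PySem.Set.ofList (l.map pyKey) := by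
        intro hm
        have h2 : (l.foldl bestStep PySem.Dict.empty).contains (pyKey c) = true :=
          (PySem.Dict.contains_iff_mem_keys _ _).mpr (by rw [ih]; exact hm)
        rw [h2] at hc; cases hc
      simp [PySem.Set.add, PySem.Set.contains, hmem]
    | some b =>
      have hc : (l.foldl bestStep PySem.Dict.empty).contains (pyKey c) = true := by
        rw [PySem.Dict.contains_eq_isSome_get?, hg]; rfl
      have hmem : pyKey c ∈ PySem.Set.ofList (l.map pyKey) := by
        have := (PySem.Dict.contains_iff_mem_keys _ _).mp hc
        rwa [ih] at this
      by_cases hlt : tupLt (-(c.length : Int), c) (-(b.length : Int), b) = true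
      · simp only [hlt, if_true]
        rw [PySem.Dict.keys_insert_of_contains _ _ hc, ih]
        simp [PySem.Set.add, PySem.Set.contains, hmem]
      · have hlt' : tupLt (-(c.length : Int), c) (-(b.length : Int), b) = false := by
          simpa using hlt
        simp [hlt', ih, PySem.Set.add, PySem.Set.contains, hmem]

theorem keys_foldA (chains : List (List Int)) :
    (chains.foldl groupStep PySem.Dict.empty).keys =
      PySem.Set.ofList (chains.map pyKey) := by
  have h2 : chains.foldl groupStep PySem.Dict.empty =
      chains.foldl
        (fun d x => d.modify (pyKey x) ([] : List (List Int))
          ((fun (_ : PySem.Dict (Int × Int) (List (List Int))) (x : List Int)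
              (g : List (List Int)) => g ++ [x]) d x))
        PySem.Dict.empty := rfl
  rw [h2, PySem.Dict.keys_foldl_modify_key, PySem.Dict.keys_empty,
    PySem.Set.ofList_eq_foldl]
  rfl

theorem getD_foldA (chains : List (List Int)) (k : Int × Int) :
    (chains.foldl groupStep PySem.Dict.empty).getD k [] = filt k chains := by
  have h1 : chains.foldl groupStep PySem.Dict.empty =
      (chains.map (fun c => (pyKey c, c))).foldl
        (fun d p => d.modify p.1 [] (fun g => g ++ [p.2])) PySem.Dict.empty := by
    rw [List.foldl_map]; rfl
  rw [h1, PySem.Dict.getD_foldl_modify_append]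
  simp [filt, List.filter_map, Function.comp_def]

-- ===== VERDICT (by name: the statement is the Claim_ definition above) =====
theorem canonicalize_chains_spec : Claim_equal_canonicalize_chains := by
  unfold Claim_equal_canonicalize_chains
  intro chains _ _
  unfold Spec_canonicalize_chains canonicalize_chains canonicalize_chains_alt
  have hkA := keys_foldA chains
  have hkB := keys_foldB chains
  have hnodup : (PySem.Set.ofList (chains.map pyKey)).Nodup := PySem.Set.nodup_ofList _
  rw [PySem.List.foldl_append_singleton_eq_map
      (fun p : (Int × Int) × List (List Int) =>
        PySem.List.pyGetD
          (PySem.List.sorted2 p.2 (fun c => -(c.length : Int)) (fun c => c)) 0 [])]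
  rw [PySem.Dict.items_eq_map_keys _ (by rw [hkA]; exact hnodup) ([] : List (List Int))]
  rw [PySem.Dict.values_eq_map_keys _ (by rw [hkB]; exact hnodup) ([] : List Int)]
  rw [List.map_map, hkA, hkB]
  simp only [List.nil_append]
  apply List.map_congr_left
  intro k hk
  have hmem : k ∈ chains.map pyKey := (PySem.Set.mem_ofList _ _).mp hk
  obtain ⟨c, hc, rfl⟩ := List.mem_map.mp hmem
  have hfilt : filt (pyKey c) chains ≠ [] := by
    intro h0
    have hcin : c ∈ filt (pyKey c) chains := by simp [filt, hc]
    rw [h0] at hcin; cases hcin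
  simp only [Function.comp]
  rw [getD_foldA, PySem.Dict.getD_eq_get?_getD, get?_foldB]
  cases hg : filt (pyKey c) chains with
  | nil => exact absurd hg hfilt
  | cons g0 gt => simpa using sorted2_head g0 gt
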